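-- pv_equiv track=rewrite | github.com/chenhh/Uva | uva_103_lis.py | dp_lis
-- ===== SOURCE A (Python) =====
-- def cmp_dominated(box_item1, box_item2):
--     """
--     box_item: key, values
--
--     return a negative value for less-than,
--     return zero if they are equal, or
--     return a positive value for greater-than.
--     """
--     _, box1 = box_item1
--     _, box2 = box_item2
--     n_dim = len(box1)
--
--     for idx in range(n_dim):
--         if box1[idx] >= box2[idx]:
--             # box2 does not dominating box1, equal
--             return 0
--     # box2 dominating box1
--     return 1
--
-- def dp_lis(box_items, n_box):
--     """
--     dynamic programming
--     lis(n) = max (lis(i) + 1: if s[i] <s[n])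
--     """
--     keys, boxes = zip(*box_items)
--
--     # each element is an lis of length 1
--     len_lis = [1] * n_box
--     prev = [-1] * n_box
--
--     for idx in range(n_box):
--         for jdx in range(idx + 1, n_box):
--             if cmp_dominated(box_items[idx], box_items[jdx]):
--                 # jdx dominating idx
--                 if len_lis[idx] + 1 > len_lis[jdx]:
--                     # jdx item is behind the idx item
--                     len_lis[jdx] = len_lis[idx] + 1
--                     prev[jdx] = idx
--     # print (len_lis)
--     # print (prev)
--     max_len_lis = max(len_lis)
--
--     # traceback
--     curr = 0
--     for idx in range(n_box):
--         if len_lis[idx] == max_len_lis: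
--             curr = idx
--             break
--
--     ans = []
--     while curr != -1:
--         ans.append(keys[curr])
--         curr = prev[curr]
--
--     return (max_len_lis, " ".join(map(str, ans[::-1])))
-- ===== SOURCE B (Python) =====
-- def dp_lis(box_items, n_box):
--     """
--     top-down: memoized recursive chain length over the dominance DAG;
--     the answer chain is rebuilt by a need-matching search (no prev pointers).
--     """
--     def dominates(i, j):
--         small, big = box_items[i][1], box_items[j][1]
--         return all(small[k] < big[k] for k in range(len(small)))
--
--     memo = {}
--     def chain_len(j):
--         if j not in memo:
--             memo[j] = 1 + max((chain_len(i) for i in range(j) if dominates(i, j)),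
--                               default=0)
--         return memo[j]
--
--     best = max(chain_len(j) for j in range(n_box))
--     curr = next(j for j in range(n_box) if chain_len(j) == best)
--
--     words = []
--     need = best
--     while need > 0:
--         words.append(str(box_items[curr][0]))
--         need -= 1
--         if need > 0:
--             curr = next(i for i in range(curr)
--                         if chain_len(i) == need and dominates(i, curr))
--     return (best, " ".join(reversed(words)))
-- ===== Notes on version B (the rewrite author's own statement) =====
-- stated objective: alternative
-- what changed: A fills length and predecessor arrays bottom-up with a doubly-nested forward-push loop and then traces prev pointers back; B keeps no arrays and no prev pointers at all: it defines the chain length at an index by top-down memoized recursion over the dominance DAG and rebuilds the answer chain afterwards by searching, at each step, for the first earlier dominated index whose recursive chain length matches the remaining need.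
import Mathlib
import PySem

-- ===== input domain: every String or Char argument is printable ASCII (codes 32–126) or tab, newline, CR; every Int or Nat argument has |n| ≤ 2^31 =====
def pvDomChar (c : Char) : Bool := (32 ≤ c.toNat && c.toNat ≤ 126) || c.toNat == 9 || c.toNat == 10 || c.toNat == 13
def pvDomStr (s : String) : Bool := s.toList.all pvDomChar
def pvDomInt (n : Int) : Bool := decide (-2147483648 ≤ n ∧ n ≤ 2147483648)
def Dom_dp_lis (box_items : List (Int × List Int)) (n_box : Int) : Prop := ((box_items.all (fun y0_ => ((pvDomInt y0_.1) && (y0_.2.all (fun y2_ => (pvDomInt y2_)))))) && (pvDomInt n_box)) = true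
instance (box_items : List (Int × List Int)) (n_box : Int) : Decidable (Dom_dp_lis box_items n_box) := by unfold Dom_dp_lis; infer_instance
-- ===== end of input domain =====

-- B replaces A's forward-push DP arrays + prev-pointer traceback by top-down memoized
-- recursion for chain lengths and a prev-free need-matching rebuild of the answer chain
-- (alternative decomposition, same asymptotic cost).


-- ===== PORT A =====
-- cmp_dominated's 'for idx in range(n_dim)' loop with its early 'return 0', as recursion
-- over the index list.  Indexing uses pyGetD, a total surrogate for xs[idx]: inside Pre_
-- every access Python performs is in range, so this is exact there.
def cmpGo (box1 box2 : List Int) : List Int → Int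
  | [] => 1
  | idx :: rest =>
    if PySem.List.pyGetD box1 idx 0 ≥ PySem.List.pyGetD box2 idx 0 then 0
    else cmpGo box1 box2 rest

def cmp_dominated (box_item1 box_item2 : Int × List Int) : Int :=
  cmpGo box_item1.2 box_item2.2 (PySem.List.pyRange 0 (PySem.List.len box_item1.2) 1)

-- body of A's inner 'for jdx' loop (state = (len_lis, prev))
def pushA (box_items : List (Int × List Int)) (idx : Int)
    (st : List Int × List Int) (jdx : Int) : List Int × List Int :=
  if cmp_dominated (PySem.List.pyGetD box_items idx (0, []))
       (PySem.List.pyGetD box_items jdx (0, [])) ≠ 0 then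
    if PySem.List.pyGetD st.1 idx 0 + 1 > PySem.List.pyGetD st.1 jdx 0 then
      (PySem.List.pySetD st.1 jdx (PySem.List.pyGetD st.1 idx 0 + 1),
       PySem.List.pySetD st.2 jdx idx)
    else st
  else st

-- 'for idx in range(n_box): if len_lis[idx] == max: curr = idx; break'  (curr stays 0 without a hit)
def findCurr (len_lis : List Int) (m : Int) : List Int → Int
  | [] => 0
  | idx :: rest =>
    if PySem.List.pyGetD len_lis idx 0 = m then idx else findCurr len_lis m rest

-- 'while curr != -1' traceback; fuel n_box+1 bounds it (prev entries strictly decrease)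
def traceA (keys prev : List Int) : Nat → Int → List Int → List Int
  | 0, _, ans => ans
  | fuel + 1, curr, ans =>
    if curr = -1 then ans
    else traceA keys prev fuel (PySem.List.pyGetD prev curr (-1))
          (ans ++ [PySem.List.pyGetD keys curr 0])

def dp_lis (box_items : List (Int × List Int)) (n_box : Int) : Int × String :=
  let keys := box_items.map Prod.fst          -- keys, boxes = zip(*box_items)
  let st :=
    (PySem.List.pyRange 0 n_box 1).foldl
      (fun st idx =>
        (PySem.List.pyRange (idx + 1) n_box 1).foldl (pushA box_items idx) st)
      (List.replicate n_box.toNat 1, List.replicate n_box.toNat (-1))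
  -- max(len_lis): empty only when n_box ≤ 0, where Python raises (outside Pre_)
  let max_len_lis := (PySem.List.max? st.1 (fun x => x)).getD 0
  let curr := findCurr st.1 max_len_lis (PySem.List.pyRange 0 n_box 1)
  let ans := traceA keys st.2 (n_box.toNat + 1) curr []
  (max_len_lis, PySem.Str.join " " (ans.reverse.map PySem.Int.toStr))

-- ===== PORT B =====
-- all(small[k] < big[k] for k in range(len(small))): getD is the total surrogate for
-- the two subscripts; exact wherever B's Python returns (inside Pre_).
def dominatesAlt (box_items : List (Int × List Int)) (i j : Nat) : Bool :=
  let small := (box_items.getD i (0, [])).2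
  let big := (box_items.getD j (0, [])).2
  (List.range small.length).all (fun k => decide (small.getD k 0 < big.getD k 0))

-- chain_len(j) = 1 + max(chain_len(i) for i in range(j) if dominates(i, j), default=0):
-- the memo dict is Python's cache for this very recursion; Python's max-with-default-0 of
-- positive values is the running max from 0.
def chainLenAlt (box_items : List (Int × List Int)) : Nat → Int
  | j =>
    1 + (List.range j).attach.foldl
      (fun m i => if dominatesAlt box_items i.1 j then max m (chainLenAlt box_items i.1) else m) 0
decreasing_by exact List.mem_range.mp i.2

-- the 'while need > 0' rebuild loop, on fuel need; 'next(...)' is first-match with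
-- surrogate default 0, never needed inside Pre_ (a matching predecessor always exists)
def rebuildAlt (box_items : List (Int × List Int)) : Nat → Nat → List String
  | 0, _ => []
  | need + 1, curr =>
    PySem.Int.toStr (box_items.getD curr (0, [])).1 ::
      (if need = 0 then []
       else rebuildAlt box_items need
        (((List.range curr).filter (fun i =>
            chainLenAlt box_items i == (need : Int) && dominatesAlt box_items i curr)).headD 0))

def dp_lis_alt (box_items : List (Int × List Int)) (n_box : Int) : Int × String :=
  -- max(chain_len(j) for j in range(n_box)): running max from 0, exact since every
  -- chain length is ≥ 1 and n_box ≥ 1 inside Pre_ (Python raises on an empty max)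
  let best := (List.range n_box.toNat).foldl (fun m j => max m (chainLenAlt box_items j)) 0
  -- next(j for j in range(n_box) if chain_len(j) == best): first match
  let curr := ((List.range n_box.toNat).filter
      (fun j => chainLenAlt box_items j == best)).headD 0
  let words := rebuildAlt box_items best.toNat curr
  (best, PySem.Str.join " " words.reverse)

-- ===== PRECONDITION & SPEC =====
-- Pre_ excludes exactly the inputs on which A raises: n_box outside 1..len(box_items)
-- (zip() of nothing / IndexError / max of []), or some pair i < j among the first n_box
-- boxes where box i is longer than box j yet strictly below it on every coordinate of
-- box j — there cmp_dominated reads box j past its end and raises IndexError.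
def Pre_dp_lis (box_items : List (Int × List Int)) (n_box : Int) : Prop :=
  1 ≤ n_box ∧ n_box ≤ (box_items.length : Int) ∧
  ∀ j < n_box.toNat, ∀ i < j,
    (box_items.getD i (0, [])).2.length ≤ (box_items.getD j (0, [])).2.length ∨
    ∃ k < (box_items.getD j (0, [])).2.length,
      (box_items.getD j (0, [])).2.getD k 0 ≤ (box_items.getD i (0, [])).2.getD k 0

instance (box_items : List (Int × List Int)) (n_box : Int) : Decidable (Pre_dp_lis box_items n_box) := by
  unfold Pre_dp_lis; infer_instance

def pvWitness_dp_lis : (List (Int × List Int)) × Int := ([(1, [1]), (2, [2])], 2)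

def Spec_dp_lis (box_items : List (Int × List Int)) (n_box : Int) (out : Int × String) : Prop := out = dp_lis_alt box_items n_box
instance (box_items : List (Int × List Int)) (n_box : Int) (out : Int × String) : Decidable (Spec_dp_lis box_items n_box out) := by unfold Spec_dp_lis; infer_instance

-- ===== CLAIM (what is proved, stated in full; the proofs are below) =====
def Claim_equal_dp_lis : Prop := ∀ (box_items : List (Int × List Int)) (n_box : Int), Dom_dp_lis box_items n_box → Pre_dp_lis box_items n_box → Spec_dp_lis box_items n_box (dp_lis box_items n_box)

-- ===== LEMMAS AND PROOFS =====

-- ---------- small getD helpers ----------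
lemma getD_set_self {α : Type} (l : List α) (i : Nat) (v d : α) (h : i < l.length) :
    (l.set i v).getD i d = v := by
  simp [List.getD_eq_getElem?_getD, h]

lemma getD_set_ne {α : Type} (l : List α) {i j : Nat} (v d : α) (h : j ≠ i) :
    (l.set i v).getD j d = l.getD j d := by
  simp [List.getD_eq_getElem?_getD, Ne.symm h]

lemma getD_map_fst (items : List (Int × List Int)) (t : Nat) :
    (items.map Prod.fst).getD t 0 = (items.getD t (0, [])).1 := by
  by_cases h : t < items.length
  · simp [List.getD_eq_getElem?_getD, List.getElem?_eq_getElem, h]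
  · rw [List.getD_eq_default _ _ (by simpa using h), List.getD_eq_default _ _ (by omega)]

-- ---------- B's running max G and its properties ----------
def G (items : List (Int × List Int)) (t : Nat) : Nat → Int
  | 0 => 0
  | c + 1 =>
    if dominatesAlt items c t then max (G items t c) (chainLenAlt items c) else G items t c

lemma G_foldl (items : List (Int × List Int)) (t : Nat) : ∀ c,
    (List.range c).foldl
      (fun m i => if dominatesAlt items i t then max m (chainLenAlt items i) else m) 0
      = G items t c := by
  intro c
  induction c with
  | zero => rfl
  | succ c ih => rw [List.range_succ, List.foldl_append, ih]; rfl

lemma chainLen_eq (items : List (Int × List Int)) (t : Nat) :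
    chainLenAlt items t = 1 + G items t t := by
  rw [chainLenAlt]
  congr 1
  rw [← G_foldl items t t]
  exact List.foldl_attach (l := List.range t)
    (f := fun m i => if dominatesAlt items i t = true then max m (chainLenAlt items i) else m)
    (b := 0)

lemma G_nonneg (items : List (Int × List Int)) (t : Nat) : ∀ c, 0 ≤ G items t c := by
  intro c
  induction c with
  | zero => simp [G]
  | succ c ih =>
    simp only [G]
    split_ifs
    · exact le_trans ih (le_max_left _ _)
    · exact ih

lemma chainLen_pos (items : List (Int × List Int)) (t : Nat) : 1 ≤ chainLenAlt items t := by
  rw [chainLen_eq]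
  have := G_nonneg items t t
  omega

lemma G_bound (items : List (Int × List Int)) (t : Nat) : ∀ c, ∀ i < c,
    dominatesAlt items i t = true → chainLenAlt items i ≤ G items t c := by
  intro c
  induction c with
  | zero => omega
  | succ c ih =>
    intro i hi hd
    by_cases hic : i = c
    · subst hic
      simp only [G, hd, if_true]
      exact le_max_right _ _
    · have h := ih i (by omega) hd
      simp only [G]
      split_ifs
      · exact le_trans h (le_max_left _ _)
      · exact h

lemma G_attained (items : List (Int × List Int)) (t : Nat) : ∀ c, 0 < G items t c →
    ∃ i < c, dominatesAlt items i t = true ∧ chainLenAlt items i = G items t c := by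
  intro c
  induction c with
  | zero => intro h; simp [G] at h
  | succ c ih =>
    intro h
    by_cases hd : dominatesAlt items c t
    · simp only [G, hd, if_true] at h ⊢
      by_cases hle : chainLenAlt items c ≤ G items t c
      · rw [max_eq_left hle] at h ⊢
        obtain ⟨i, hi, h1, h2⟩ := ih h
        exact ⟨i, by omega, h1, h2⟩
      · rw [max_eq_right (by omega)] at h ⊢
        exact ⟨c, by omega, hd, rfl⟩
    · simp only [G, hd, if_false] at h ⊢
      obtain ⟨i, hi, h1, h2⟩ := ih h
      exact ⟨i, by omega, h1, h2⟩

lemma chainLen_le (items : List (Int × List Int)) : ∀ t, chainLenAlt items t ≤ (t : Int) + 1 := by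
  intro t
  induction t using Nat.strong_induction_on with
  | _ t ih =>
    rw [chainLen_eq]
    by_cases h0 : 0 < G items t t
    · obtain ⟨i, hi, -, h2⟩ := G_attained items t t h0
      have := ih i hi
      rw [h2] at this
      have : (i : Int) + 1 ≤ (t : Int) := by exact_mod_cast hi
      omega
    · have := G_nonneg items t t
      have hz : G items t t = 0 := by omega
      rw [hz]
      have : (0 : Int) ≤ (t : Int) := Int.natCast_nonneg t
      omega

-- ---------- pull cell pc: the value A's push loops leave in cell t after c candidates ----------
def pc (items : List (Int × List Int)) (t : Nat) : Nat → Int × Int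
  | 0 => (1, -1)
  | c + 1 =>
    if chainLenAlt items c + 1 > (pc items t c).1 ∧ dominatesAlt items c t = true then
      (chainLenAlt items c + 1, (c : Int))
    else pc items t c

lemma pc1_eq (items : List (Int × List Int)) (t : Nat) : ∀ c,
    (pc items t c).1 = 1 + G items t c := by
  intro c
  induction c with
  | zero => simp [pc, G]
  | succ c ih =>
    simp only [pc, G]
    by_cases hd : dominatesAlt items c t
    · simp only [hd, if_true, and_true]
      by_cases hlt : chainLenAlt items c + 1 > (pc items t c).1
      · rw [if_pos hlt]
        rw [ih] at hlt
        rw [max_eq_right (by omega)]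
        show chainLenAlt items c + 1 = 1 + chainLenAlt items c
        ring
      · rw [if_neg hlt, ih]
        rw [ih] at hlt
        rw [max_eq_left (by omega)]
    · simp [hd, ih]

lemma pc_self (items : List (Int × List Int)) (t : Nat) :
    (pc items t t).1 = chainLenAlt items t := by
  rw [pc1_eq, chainLen_eq]

-- first earlier dominated index whose chain length equals the prefix max (-1 if none):
-- the value A's prev cell ends at
def Pdef (items : List (Int × List Int)) (t c : Nat) : Int :=
  (((List.range c).filter (fun i =>
      dominatesAlt items i t && chainLenAlt items i == G items t c)).head?).elim (-1)
    (fun i => (i : Int))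

lemma pc2_eq (items : List (Int × List Int)) (t : Nat) : ∀ c,
    (pc items t c).2 = Pdef items t c := by
  intro c
  induction c with
  | zero => simp [pc, Pdef]
  | succ c ih =>
    simp only [pc]
    by_cases hd : dominatesAlt items c t
    · by_cases hlt : chainLenAlt items c + 1 > (pc items t c).1
      · rw [if_pos ⟨hlt, hd⟩]
        rw [pc1_eq] at hlt
        have hgt : G items t c < chainLenAlt items c := by omega
        have hG : G items t (c + 1) = chainLenAlt items c := by
          simp only [G, hd, if_true]
          rw [max_eq_right (by omega)]
        unfold Pdef
        rw [List.range_succ, List.filter_append]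
        have hempty : (List.range c).filter (fun i =>
            dominatesAlt items i t && chainLenAlt items i == G items t (c + 1)) = [] := by
          rw [List.filter_eq_nil_iff]
          intro i hi
          simp only [Bool.and_eq_true, beq_iff_eq, not_and]
          intro hdi
          have := G_bound items t c i (List.mem_range.mp hi) hdi
          rw [hG]
          omega
        rw [hempty, List.nil_append]
        simp [hd, hG]
      · rw [if_neg (by rintro ⟨h1, -⟩; exact hlt h1), ih]
        rw [pc1_eq] at hlt
        have hle : chainLenAlt items c ≤ G items t c := by omega
        have hG : G items t (c + 1) = G items t c := by
          simp only [G, hd, if_true]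
          rw [max_eq_left hle]
        unfold Pdef
        rw [List.range_succ, List.filter_append, hG]
        by_cases hceq : chainLenAlt items c = G items t c
        · -- c itself matches, but an earlier match exists (G > 0 is attained)
          have hpos : 0 < G items t c := by
            have := chainLen_pos items c
            omega
          obtain ⟨i, hi, h1, h2⟩ := G_attained items t c hpos
          have hmem : i ∈ (List.range c).filter (fun i =>
              dominatesAlt items i t && chainLenAlt items i == G items t c) := by
            rw [List.mem_filter]
            exact ⟨List.mem_range.mpr hi, by simp [h1, h2]⟩
          have hne : (List.range c).filter (fun i =>
              dominatesAlt items i t && chainLenAlt items i == G items t c) ≠ [] := by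
            intro hnil
            rw [hnil] at hmem
            exact List.not_mem_nil hmem
          rw [List.head?_append]
          cases hcase : ((List.range c).filter (fun i =>
              dominatesAlt items i t && chainLenAlt items i == G items t c)).head? with
          | none => exact absurd (List.head?_eq_none_iff.mp hcase) hne
          | some x => simp
        · have : ((fun i => dominatesAlt items i t && chainLenAlt items i == G items t c) c) = false := by
            simp [hceq]
          simp [List.filter_singleton, this]
    · rw [if_neg (by rintro ⟨-, h2⟩; exact hd h2), ih]
      have hG : G items t (c + 1) = G items t c := by simp [G, hd]
      unfold Pdef
      rw [List.range_succ, List.filter_append, hG]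
      have : ((fun i => dominatesAlt items i t && chainLenAlt items i == G items t c) c) = false := by
        simp [hd]
      simp [List.filter_singleton, this]

lemma Pdef_neg (items : List (Int × List Int)) (t : Nat) (h : G items t t = 0) :
    Pdef items t t = -1 := by
  unfold Pdef
  have hempty : (List.range t).filter (fun i =>
      dominatesAlt items i t && chainLenAlt items i == G items t t) = [] := by
    rw [List.filter_eq_nil_iff]
    intro i hi
    simp only [Bool.and_eq_true, beq_iff_eq, not_and]
    intro hdi
    have := chainLen_pos items i
    rw [h]
    omega
  rw [hempty]
  rfl

-- ---------- A's cmp_dominated equals B's dominatesAlt test ----------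
lemma cmpGo_scan (b1 b2 : List Int) : ∀ s : Nat,
    cmpGo b1 b2 (PySem.List.pyRange (s : Int) ((b1.length : Int)) 1) =
      if ∃ k < b1.length, s ≤ k ∧ b2.getD k 0 ≤ b1.getD k 0 then 0 else 1 := by
  suffices H : ∀ d s, b1.length - s ≤ d →
      cmpGo b1 b2 (PySem.List.pyRange (s : Int) ((b1.length : Int)) 1) =
        if ∃ k < b1.length, s ≤ k ∧ b2.getD k 0 ≤ b1.getD k 0 then 0 else 1 by
    intro s; exact H _ s le_rfl
  intro d
  induction d with
  | zero =>
    intro s hd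
    rw [PySem.List.pyRange_one_eq_nil (by exact_mod_cast (by omega : b1.length ≤ s)),
      if_neg (by rintro ⟨k, hk, hs, -⟩; omega)]
    rfl
  | succ d ihd =>
    intro s hd
    by_cases hs : s < b1.length
    · rw [PySem.List.pyRange_one_cons (by exact_mod_cast hs)]
      simp only [cmpGo, PySem.List.pyGetD_natCast, ge_iff_le]
      by_cases hb : b2.getD s 0 ≤ b1.getD s 0
      · rw [if_pos hb, if_pos ⟨s, hs, le_rfl, hb⟩]
      · rw [if_neg hb, show ((s : Int) + 1) = (((s + 1 : Nat)) : Int) by push_cast; ring,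
          ihd (s + 1) (by omega)]
        refine if_congr ⟨fun ⟨k, hk, h1, h2⟩ => ⟨k, hk, by omega, h2⟩,
          fun ⟨k, hk, h1, h2⟩ => ⟨k, hk, ?_, h2⟩⟩ rfl rfl
        rcases Nat.eq_or_lt_of_le h1 with rfl | h
        · exact absurd h2 hb
        · omega
    · rw [PySem.List.pyRange_one_eq_nil (by exact_mod_cast (by omega : b1.length ≤ s)),
        if_neg (by rintro ⟨k, hk, hks, -⟩; omega)]
      rfl

lemma cmp_eq_dom (items : List (Int × List Int)) (i j : Nat) :
    cmp_dominated (items.getD i (0, [])) (items.getD j (0, []))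
      = if dominatesAlt items i j then 1 else 0 := by
  have h := cmpGo_scan (items.getD i (0, [])).2 (items.getD j (0, [])).2 0
  rw [Nat.cast_zero] at h
  unfold cmp_dominated
  rw [PySem.List.len_eq, h]
  unfold dominatesAlt
  by_cases hdom : (List.range (items.getD i (0, [])).2.length).all
      (fun k => decide ((items.getD i (0, [])).2.getD k 0 < (items.getD j (0, [])).2.getD k 0)) = true
  · rw [if_pos hdom, if_neg]
    rw [List.all_eq_true] at hdom
    rintro ⟨k, hk, -, hle⟩
    have h2 := hdom k (List.mem_range.mpr hk)
    simp only [decide_eq_true_eq] at h2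
    omega
  · rw [if_neg hdom, if_pos]
    rw [List.all_eq_true] at hdom
    simp only [not_forall] at hdom
    obtain ⟨k, hk, hd⟩ := hdom
    simp only [decide_eq_true_eq, not_lt] at hd
    exact ⟨k, List.mem_range.mp hk, Nat.zero_le k, hd⟩

-- ---------- A-side loop invariant ----------
lemma innerA_eq (items : List (Int × List Int)) (n k : Nat) (hk : k < n)
    (s : List Int × List Int)
    (hs1 : s.1.length = n) (hs2 : s.2.length = n)
    (hcell : ∀ t < n, s.1.getD t 0 = (pc items t (min t k)).1 ∧
                      s.2.getD t 0 = (pc items t (min t k)).2) :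
    ∀ m, k + 1 ≤ m → m ≤ n →
      ((PySem.List.pyRange ((k : Int) + 1) (m : Int) 1).foldl (pushA items (k : Int)) s).1.length = n ∧
      ((PySem.List.pyRange ((k : Int) + 1) (m : Int) 1).foldl (pushA items (k : Int)) s).2.length = n ∧
      ∀ t < n,
        ((PySem.List.pyRange ((k : Int) + 1) (m : Int) 1).foldl (pushA items (k : Int)) s).1.getD t 0
            = (pc items t (if k + 1 ≤ t ∧ t < m then k + 1 else min t k)).1 ∧
        ((PySem.List.pyRange ((k : Int) + 1) (m : Int) 1).foldl (pushA items (k : Int)) s).2.getD t 0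
            = (pc items t (if k + 1 ≤ t ∧ t < m then k + 1 else min t k)).2 := by
  intro m hm1
  induction m, hm1 using Nat.le_induction with
  | base =>
    intro _
    rw [show ((k + 1 : Nat) : Int) = (k : Int) + 1 by push_cast; ring,
      PySem.List.pyRange_one_eq_nil le_rfl]
    refine ⟨hs1, hs2, ?_⟩
    intro t ht
    rw [if_neg (by omega)]
    exact hcell t ht
  | succ m hm ih =>
    intro hm2
    have hmn : m < n := by omega
    obtain ⟨hr1, hr2, hrc⟩ := ih (by omega)
    rw [show ((m + 1 : Nat) : Int) = (m : Int) + 1 by push_cast; ring,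
      PySem.List.pyRange_one_succ_right (by exact_mod_cast hm : (k : Int) + 1 ≤ (m : Int)),
      List.foldl_append]
    simp only [List.foldl_cons, List.foldl_nil]
    set F := (PySem.List.pyRange ((k : Int) + 1) (m : Int) 1).foldl (pushA items (k : Int)) s with hF
    have hck : F.1.getD k 0 = (pc items k k).1 := by
      have h := (hrc k (by omega)).1
      rwa [if_neg (by omega), Nat.min_self] at h
    have hcm1 : F.1.getD m 0 = (pc items m k).1 := by
      have h := (hrc m hmn).1
      rwa [if_neg (by omega), Nat.min_eq_right (by omega)] at h
    have hcm2 : F.2.getD m 0 = (pc items m k).2 := by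
      have h := (hrc m hmn).2
      rwa [if_neg (by omega), Nat.min_eq_right (by omega)] at h
    have hcmp := cmp_eq_dom items k m
    have harg : ∀ t, t ≠ m →
        (if k + 1 ≤ t ∧ t < m + 1 then k + 1 else min t k)
          = (if k + 1 ≤ t ∧ t < m then k + 1 else min t k) := by
      intro t htm; split_ifs <;> omega
    simp only [pushA, PySem.List.pyGetD_natCast, PySem.List.pySetD_natCast, hcmp, hck, hcm1,
      pc_self]
    by_cases hdom : dominatesAlt items k m = true
    · rw [if_pos hdom]
      by_cases hlt : chainLenAlt items k + 1 > (pc items m k).1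
      · rw [if_pos (show (1 : Int) ≠ 0 by norm_num), if_pos hlt]
        have hpcm : pc items m (k + 1) = (chainLenAlt items k + 1, (k : Int)) := by
          simp only [pc]
          rw [if_pos ⟨hlt, hdom⟩]
        refine ⟨by simpa using hr1, by simpa using hr2, ?_⟩
        intro t ht
        by_cases htm : t = m
        · subst htm
          rw [if_pos (by omega), hpcm]
          exact ⟨getD_set_self _ _ _ _ (by omega), getD_set_self _ _ _ _ (by omega)⟩
        · rw [harg t htm]
          exact ⟨(getD_set_ne _ _ _ htm).trans (hrc t ht).1,
            (getD_set_ne _ _ _ htm).trans (hrc t ht).2⟩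
      · rw [if_pos (show (1 : Int) ≠ 0 by norm_num), if_neg hlt]
        have hpcm : pc items m (k + 1) = pc items m k := by
          simp only [pc]
          rw [if_neg]
          rintro ⟨ha, -⟩
          exact hlt ha
        refine ⟨hr1, hr2, ?_⟩
        intro t ht
        by_cases htm : t = m
        · subst htm
          rw [if_pos (by omega), hpcm]
          exact ⟨hcm1, hcm2⟩
        · rw [harg t htm]
          exact hrc t ht
    · rw [if_neg hdom, if_neg (show ¬((0 : Int) ≠ 0) by norm_num)]
      have hpcm : pc items m (k + 1) = pc items m k := by
        simp only [pc]
        rw [if_neg]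
        rintro ⟨-, hb⟩
        exact hdom hb
      refine ⟨hr1, hr2, ?_⟩
      intro t ht
      by_cases htm : t = m
      · subst htm
        rw [if_pos (by omega), hpcm]
        exact ⟨hcm1, hcm2⟩
      · rw [harg t htm]
        exact hrc t ht

lemma stateA_eq (items : List (Int × List Int)) (n : Nat) :
    ∀ k ≤ n,
      ((PySem.List.pyRange 0 (k : Int) 1).foldl
        (fun st idx => (PySem.List.pyRange (idx + 1) (n : Int) 1).foldl (pushA items idx) st)
        (List.replicate n 1, List.replicate n (-1))).1.length = n ∧
      ((PySem.List.pyRange 0 (k : Int) 1).foldl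
        (fun st idx => (PySem.List.pyRange (idx + 1) (n : Int) 1).foldl (pushA items idx) st)
        (List.replicate n 1, List.replicate n (-1))).2.length = n ∧
      ∀ t < n,
        ((PySem.List.pyRange 0 (k : Int) 1).foldl
          (fun st idx => (PySem.List.pyRange (idx + 1) (n : Int) 1).foldl (pushA items idx) st)
          (List.replicate n 1, List.replicate n (-1))).1.getD t 0 = (pc items t (min t k)).1 ∧
        ((PySem.List.pyRange 0 (k : Int) 1).foldl
          (fun st idx => (PySem.List.pyRange (idx + 1) (n : Int) 1).foldl (pushA items idx) st)
          (List.replicate n 1, List.replicate n (-1))).2.getD t 0 = (pc items t (min t k)).2 := by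
  intro k
  induction k with
  | zero =>
    intro _
    rw [Nat.cast_zero, PySem.List.pyRange_one_eq_nil le_rfl]
    simp only [List.foldl_nil]
    refine ⟨by simp, by simp, ?_⟩
    intro t ht
    rw [Nat.min_zero]
    constructor <;> simp [pc, List.getD_eq_getElem?_getD, ht]
  | succ k ihk =>
    intro hk1
    obtain ⟨ha1, ha2, hac⟩ := ihk (by omega)
    rw [Nat.cast_succ, PySem.List.pyRange_one_succ_right (Int.natCast_nonneg k),
      List.foldl_append]
    simp only [List.foldl_cons, List.foldl_nil]
    have h := innerA_eq items n k (by omega) _ ha1 ha2 hac n (by omega) le_rfl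
    refine ⟨h.1, h.2.1, ?_⟩
    intro t ht
    have harg : (if k + 1 ≤ t ∧ t < n then k + 1 else min t k) = min t (k + 1) := by
      split_ifs <;> omega
    have h2 := h.2.2 t ht
    rw [harg] at h2
    exact h2

-- ---------- B's running max over all indices ----------
lemma bestB_ge (items : List (Int × List Int)) (n : Nat) : ∀ j < n,
    chainLenAlt items j ≤
      (List.range n).foldl (fun m j => max m (chainLenAlt items j)) 0 := by
  intro j hj
  exact (PySem.List.le_foldl_max_int (List.range n) (chainLenAlt items) 0).2 j
    (List.mem_range.mpr hj)

lemma bestB_attained (items : List (Int × List Int)) : ∀ n : Nat,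
    0 < (List.range n).foldl (fun m j => max m (chainLenAlt items j)) 0 →
    ∃ j < n, chainLenAlt items j =
      (List.range n).foldl (fun m j => max m (chainLenAlt items j)) 0 := by
  intro n
  induction n with
  | zero => intro h; simp at h
  | succ n ih =>
    intro h
    rw [List.range_succ, List.foldl_append] at h ⊢
    simp only [List.foldl_cons, List.foldl_nil] at h ⊢
    by_cases hle : chainLenAlt items n ≤
        (List.range n).foldl (fun m j => max m (chainLenAlt items j)) 0
    · rw [max_eq_left hle] at h ⊢
      obtain ⟨j, hj, hv⟩ := ih h
      exact ⟨j, by omega, hv⟩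
    · rw [max_eq_right (by omega)]
      exact ⟨n, by omega, rfl⟩

-- ---------- find-first: A's break loop = B's filter head ----------
lemma find_eq (xs : List Int) (mval : Int) (q : Nat → Bool) :
    ∀ (cnt s : Nat), (∀ j, s ≤ j → j < s + cnt → (xs.getD j 0 = mval ↔ q j = true)) →
      findCurr xs mval (PySem.List.pyRange (s : Int) (((s + cnt : Nat)) : Int) 1)
        = ((((List.range' s cnt).filter q).headD 0 : Nat) : Int) := by
  intro cnt
  induction cnt with
  | zero =>
    intro s _
    rw [PySem.List.pyRange_one_eq_nil (by omega)]
    rfl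
  | succ cnt ih =>
    intro s hq
    rw [PySem.List.pyRange_one_cons (by exact_mod_cast (by omega : s < s + (cnt + 1)))]
    simp only [findCurr, PySem.List.pyGetD_natCast, List.range'_succ]
    by_cases hhit : xs.getD s 0 = mval
    · rw [if_pos hhit, List.filter_cons_of_pos ((hq s le_rfl (by omega)).mp hhit)]
      rfl
    · rw [if_neg hhit, List.filter_cons_of_neg (by
        intro hqs
        exact hhit ((hq s le_rfl (by omega)).mpr hqs)),
        show ((s : Int) + 1) = (((s + 1 : Nat)) : Int) by push_cast; ring,
        show (((s + (cnt + 1) : Nat)) : Int) = ((((s + 1) + cnt : Nat)) : Int) by push_cast; ring]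
      exact ih (s + 1) (fun j h1 h2 => hq j (by omega) (by omega))

-- ---------- traceback ----------
lemma traceA_append (keys prev : List Int) :
    ∀ (fuel : Nat) (curr : Int) (acc : List Int),
      traceA keys prev fuel curr acc = acc ++ traceA keys prev fuel curr [] := by
  intro fuel
  induction fuel with
  | zero => intro curr acc; simp [traceA]
  | succ f ih =>
    intro curr acc
    by_cases hc : curr = -1
    · simp [traceA, hc]
    · simp only [traceA, if_neg hc]
      rw [ih (PySem.List.pyGetD prev curr (-1)) (acc ++ [PySem.List.pyGetD keys curr 0]),
        ih (PySem.List.pyGetD prev curr (-1)) ([] ++ [PySem.List.pyGetD keys curr 0])]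
      simp

lemma traceA_neg_one (keys prev : List Int) : ∀ fuel : Nat,
    traceA keys prev fuel (-1) [] = [] := by
  intro fuel
  cases fuel <;> simp [traceA]

-- the rebuild loop reproduces A's prev-pointer traceback
lemma trace_eq (items : List (Int × List Int)) (n : Nat) (prevA : List Int)
    (hlen : prevA.length = n) (hprev : ∀ t < n, prevA.getD t 0 = Pdef items t t) :
    ∀ (need fuel t : Nat), t < n → chainLenAlt items t = (need : Int) → 1 ≤ need →
      need < fuel →
      rebuildAlt items need t
        = (traceA (items.map Prod.fst) prevA fuel (t : Int) []).map PySem.Int.toStr := by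
  intro need
  induction need with
  | zero => omega
  | succ m ih =>
    intro fuel t htn hchain _ hfuel
    obtain ⟨f, rfl⟩ : ∃ f, fuel = f + 1 := ⟨fuel - 1, by omega⟩
    have htne : (t : Int) ≠ -1 := by omega
    rw [show traceA (items.map Prod.fst) prevA (f + 1) (t : Int) []
        = traceA (items.map Prod.fst) prevA f (PySem.List.pyGetD prevA (t : Int) (-1))
            ([] ++ [PySem.List.pyGetD (items.map Prod.fst) (t : Int) 0]) from by
      simp [traceA, htne],
      traceA_append, List.nil_append]
    have hkey : PySem.List.pyGetD (items.map Prod.fst) (t : Int) 0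
        = (items.getD t (0, [])).1 := by
      rw [PySem.List.pyGetD_natCast, getD_map_fst]
    have hprevt : PySem.List.pyGetD prevA (t : Int) (-1) = Pdef items t t := by
      rw [PySem.List.pyGetD_natCast]
      have h0 := hprev t htn
      rw [List.getD_eq_getElem?_getD, List.getElem?_eq_getElem (by omega : t < prevA.length),
        Option.getD_some] at h0 ⊢
      exact h0
    have hGt : G items t t = (m : Int) := by
      have := chainLen_eq items t
      rw [hchain] at this
      push_cast at this ⊢
      omega
    rcases Nat.eq_zero_or_pos m with rfl | hm
    · -- chain length 1: no predecessor
      have hP : Pdef items t t = -1 := Pdef_neg items t (by rw [hGt]; simp)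
      rw [hprevt, hP, traceA_neg_one]
      simp only [rebuildAlt, if_pos rfl]
      simp [hkey]
    · -- chain length m+1 ≥ 2: step to the first matching predecessor
      have hGpos : 0 < G items t t := by rw [hGt]; exact_mod_cast hm
      obtain ⟨i0, hi0t, hdom0, hlen0⟩ := G_attained items t t hGpos
      have hfilter_congr : (List.range t).filter (fun i =>
            chainLenAlt items i == (m : Int) && dominatesAlt items i t)
          = (List.range t).filter (fun i =>
            dominatesAlt items i t && chainLenAlt items i == G items t t) := by
        apply List.filter_congr
        intro x _
        rw [hGt]
        exact Bool.and_comm _ _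
      have hmem : i0 ∈ (List.range t).filter (fun i =>
          dominatesAlt items i t && chainLenAlt items i == G items t t) := by
        rw [List.mem_filter]
        exact ⟨List.mem_range.mpr hi0t, by simp [hdom0, hlen0]⟩
      obtain ⟨hd, tl, hcons⟩ : ∃ hd tl, (List.range t).filter (fun i =>
          dominatesAlt items i t && chainLenAlt items i == G items t t) = hd :: tl := by
        cases hc : (List.range t).filter (fun i =>
            dominatesAlt items i t && chainLenAlt items i == G items t t) with
        | nil => rw [hc] at hmem; exact absurd hmem (List.not_mem_nil)
        | cons a b => exact ⟨a, b, rfl⟩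
      have hhd_mem : hd ∈ (List.range t).filter (fun i =>
          dominatesAlt items i t && chainLenAlt items i == G items t t) := by
        rw [hcons]; exact List.mem_cons_self
      have hhd_range : hd < t := by
        have := (List.mem_filter.mp hhd_mem).1
        exact List.mem_range.mp this
      have hhd_prop := (List.mem_filter.mp hhd_mem).2
      simp only [Bool.and_eq_true, beq_iff_eq] at hhd_prop
      have hP : Pdef items t t = (hd : Int) := by
        unfold Pdef
        rw [hcons]
        rfl
      have hstep : rebuildAlt items (m + 1) t
          = PySem.Int.toStr (items.getD t (0, [])).1 :: rebuildAlt items m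
              (((List.range t).filter (fun i =>
                chainLenAlt items i == (m : Int) && dominatesAlt items i t)).headD 0) := by
        simp only [rebuildAlt, if_neg (by omega : ¬ m = 0)]
      rw [hstep, hfilter_congr, hcons]
      simp only [List.headD_cons]
      rw [hprevt, hP,
        ih f hd (by omega) (by rw [hhd_prop.2, hGt]) hm (by omega)]
      simp [hkey]

-- ===== VERDICT (by name: the statement is the Claim_ definition above) =====
theorem dp_lis_spec : Claim_equal_dp_lis := by
  intro items n_box _ hpre
  obtain ⟨h1, h2, -⟩ := hpre
  unfold Spec_dp_lis
  simp only [dp_lis, dp_lis_alt]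
  set n := n_box.toNat with hndef
  have hn1 : 1 ≤ n := by omega
  have hnb : ((n : Nat) : Int) = n_box := Int.toNat_of_nonneg (by omega)
  rw [← hnb]
  obtain ⟨ha1, ha2, hac⟩ := stateA_eq items n n le_rfl
  set st := (PySem.List.pyRange 0 ((n : Nat) : Int) 1).foldl
      (fun st idx => (PySem.List.pyRange (idx + 1) ((n : Nat) : Int) 1).foldl (pushA items idx) st)
      (List.replicate n 1, List.replicate n (-1)) with hst
  have hcell1 : ∀ t < n, st.1.getD t 0 = chainLenAlt items t := by
    intro t ht
    have h := (hac t ht).1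
    rwa [Nat.min_eq_left (by omega), pc_self] at h
  have hcell2 : ∀ t < n, st.2.getD t 0 = Pdef items t t := by
    intro t ht
    have h := (hac t ht).2
    rwa [Nat.min_eq_left (by omega), pc2_eq] at h
  have hst1map : st.1 = (List.range n).map (fun t => chainLenAlt items t) := by
    refine List.ext_getElem (by simp [ha1]) ?_
    intro i hi1 hi2
    have hi : i < n := by rwa [ha1] at hi1
    have h := hcell1 i hi
    rw [List.getD_eq_getElem?_getD, List.getElem?_eq_getElem hi1, Option.getD_some] at h
    simp [h]
  set best := (List.range n).foldl (fun m j => max m (chainLenAlt items j)) 0 with hbest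
  have hbest_pos : 1 ≤ best := le_trans (chainLen_pos items 0) (bestB_ge items n 0 hn1)
  obtain ⟨j1, hj1n, hj1v⟩ := bestB_attained items n (by omega)
  -- A's max(len_lis) equals B's running max
  have hne : st.1 ≠ [] := by
    intro hnil
    rw [hnil] at ha1
    simp at ha1
    omega
  obtain ⟨mx, hmx⟩ : ∃ mx, PySem.List.max? st.1 (fun x => x) = some mx := by
    cases h : PySem.List.max? st.1 (fun x => x) with
    | some mx => exact ⟨mx, rfl⟩
    | none => exact absurd ((PySem.List.max?_eq_none_iff _ _).mp h) hne
  have hmx_eq : mx = best := by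
    have hmem := PySem.List.max?_mem hmx
    rw [hst1map, List.mem_map] at hmem
    obtain ⟨j, hjmem, hjv⟩ := hmem
    have hle1 : mx ≤ best := by
      rw [← hjv]
      exact bestB_ge items n j (List.mem_range.mp hjmem)
    have hle2 : best ≤ mx := by
      have hmem2 : chainLenAlt items j1 ∈ st.1 := by
        rw [hst1map, List.mem_map]
        exact ⟨j1, List.mem_range.mpr hj1n, rfl⟩
      have := PySem.List.max?_isMax hmx _ hmem2
      omega
    omega
  rw [hmx]
  simp only [Option.getD_some, hmx_eq]
  -- first index reaching the maximum
  set q : Nat → Bool := fun j => chainLenAlt items j == best with hq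
  have hfe := find_eq st.1 best q n 0 (by
    intro j _ hj
    rw [Nat.zero_add] at hj
    have := hcell1 j hj
    rw [List.getD_eq_getElem?_getD] at this
    simp [q, this])
  rw [Nat.cast_zero, Nat.zero_add, ← List.range_eq_range'] at hfe
  rw [hfe]
  set cB := ((List.range n).filter q).headD 0 with hcB
  -- cB is a member of the (nonempty) filter
  have hmemf : j1 ∈ (List.range n).filter q := by
    rw [List.mem_filter]
    exact ⟨List.mem_range.mpr hj1n, by simp [q, hj1v, hbest.symm]⟩
  obtain ⟨hd, tl, hcons⟩ : ∃ hd tl, (List.range n).filter q = hd :: tl := by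
    cases hc : (List.range n).filter q with
    | nil => rw [hc] at hmemf; exact absurd hmemf (List.not_mem_nil)
    | cons a b => exact ⟨a, b, rfl⟩
  have hcB_hd : cB = hd := by rw [hcB, hcons]; rfl
  have hhd_mem := hcons ▸ (List.mem_cons_self : hd ∈ hd :: tl)
  have hcB_n : cB < n := by
    rw [hcB_hd]
    exact List.mem_range.mp (List.mem_filter.mp hhd_mem).1
  have hcB_v : chainLenAlt items cB = best := by
    rw [hcB_hd]
    have := (List.mem_filter.mp hhd_mem).2
    simpa [q] using this
  -- the traceback
  have hbn : best ≤ (n : Int) := by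
    have := chainLen_le items j1
    have hj1i : (j1 : Int) + 1 ≤ (n : Int) := by exact_mod_cast hj1n
    omega
  have htr := trace_eq items n st.2 ha2 hcell2 best.toNat (n + 1) cB hcB_n
    (by rw [hcB_v, Int.toNat_of_nonneg (by omega)]) (by omega) (by omega)
  rw [htr]
  rw [List.map_reverse]
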